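-- pv_equiv track=rewrite | github.com/onraz/core-java | corepy/recursion/dfs.py | dfs_all_parents
-- ===== SOURCE A (Python) =====
-- from collections import defaultdict
--
-- def dfs_all_parents(graph, start):
--     stack = [start]
--     visited = set()
--     parents = defaultdict(list)
--
--     while stack:
--         node = stack.pop()
--         if node not in visited:
--             visited.add(node)
--             for nbr in graph.get(node, []):
--                 parents[nbr].append(node)
--                 stack.append(nbr)
--     return parents
-- ===== SOURCE B (Python) =====
-- from collections import defaultdict
--
-- def dfs_all_parents(graph, start):
--     visited = set()
--     parents = defaultdict(list)
--
--     def rec(node):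
--         if node in visited:
--             return
--         visited.add(node)
--         nbrs = graph.get(node, [])
--         for nbr in nbrs:
--             parents[nbr].append(node)
--         for nbr in reversed(nbrs):
--             rec(nbr)
--
--     rec(start)
--     return parents
-- ===== Notes on version B (the rewrite author's own statement) =====
-- stated objective: alternative
-- what changed: Replaces the explicit-stack while loop with a recursive DFS helper closing over visited/parents that records all neighbors forward and then descends in reversed neighbor order, reproducing the stack's LIFO order.
import Mathlib
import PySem

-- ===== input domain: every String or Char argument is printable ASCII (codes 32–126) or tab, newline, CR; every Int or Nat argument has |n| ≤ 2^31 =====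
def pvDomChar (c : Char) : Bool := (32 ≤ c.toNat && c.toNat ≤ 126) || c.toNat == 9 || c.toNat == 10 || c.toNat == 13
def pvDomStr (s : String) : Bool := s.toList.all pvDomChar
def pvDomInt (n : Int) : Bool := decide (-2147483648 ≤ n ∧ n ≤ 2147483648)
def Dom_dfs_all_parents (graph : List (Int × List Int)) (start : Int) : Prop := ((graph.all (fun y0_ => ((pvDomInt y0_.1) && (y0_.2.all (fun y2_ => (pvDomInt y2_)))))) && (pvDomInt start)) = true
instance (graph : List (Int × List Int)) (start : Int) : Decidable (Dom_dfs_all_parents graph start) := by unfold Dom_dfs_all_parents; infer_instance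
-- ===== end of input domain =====

-- B replaces A's explicit-stack while loop by a recursive DFS helper (record all
-- neighbors forward, then descend in reversed neighbor order); same result, no speed claim.

-- ===== PORT A =====
-- graph.get(node, []); the graph dict is the association list via Python dict semantics
def pvAdj (graph : List (Int × List Int)) (node : Int) : List Int :=
  (PySem.Dict.ofList graph).getD node []

-- a fuel bound on the number of loop iterations (pops ≤ pushes ≤ 1 + Σ adjacency
-- lengths); proved sufficient below, so the 0-fuel branch is never taken
def pvFuelN (graph : List (Int × List Int)) : Nat :=
  ((PySem.Dict.ofList graph).items.flatMap (fun p => p.2)).length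

-- the while loop; the Python stack is kept top-first (append = cons, pop = head)
def dfsA_loop (graph : List (Int × List Int)) :
    Nat → List Int → PySem.Set Int → PySem.Dict Int (List Int) → PySem.Dict Int (List Int)
  | 0, _, _, parents => parents
  | _ + 1, [], _, parents => parents
  | fuel + 1, node :: stack, visited, parents =>
      if PySem.Set.contains visited node then
        dfsA_loop graph fuel stack visited parents
      else
        -- for nbr in graph.get(node, []): parents[nbr].append(node); stack.append(nbr)
        let s := (pvAdj graph node).foldl
          (fun (s : PySem.Dict Int (List Int) × List Int) nbr =>
            (s.1.insert nbr (s.1.getD nbr [] ++ [node]), nbr :: s.2))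
          (parents, stack)
        dfsA_loop graph fuel s.2 (PySem.Set.add visited node) s.1

def dfs_all_parents (graph : List (Int × List Int)) (start : Int) : List (Int × List Int) :=
  (dfsA_loop graph (1 + pvFuelN graph) [start] PySem.Set.empty PySem.Dict.empty).items

-- ===== PORT B =====
-- rec(node); fuel bounds the recursion depth (≤ 1 + number of reachable nodes),
-- proved sufficient below, so the 0-fuel branch is never taken
def dfsB_rec (graph : List (Int × List Int)) :
    Nat → Int → PySem.Set Int × PySem.Dict Int (List Int) →
    PySem.Set Int × PySem.Dict Int (List Int)
  | 0, _, st => st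
  | fuel + 1, node, st =>
      if PySem.Set.contains st.1 node then st
      else
        let visited := PySem.Set.add st.1 node
        let nbrs := pvAdj graph node
        -- for nbr in nbrs: parents[nbr].append(node)
        let parents := nbrs.foldl (fun q nbr => q.insert nbr (q.getD nbr [] ++ [node])) st.2
        -- for nbr in reversed(nbrs): rec(nbr)
        nbrs.reverse.foldl (fun t nbr => dfsB_rec graph fuel nbr t) (visited, parents)

def dfs_all_parents_alt (graph : List (Int × List Int)) (start : Int) : List (Int × List Int) :=
  (dfsB_rec graph (2 + pvFuelN graph) start (PySem.Set.empty, PySem.Dict.empty)).2.items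

-- ===== PRECONDITION & SPEC =====
def Spec_dfs_all_parents (graph : List (Int × List Int)) (start : Int) (out : List (Int × List Int)) : Prop := out = dfs_all_parents_alt graph start
instance (graph : List (Int × List Int)) (start : Int) (out : List (Int × List Int)) : Decidable (Spec_dfs_all_parents graph start out) := by unfold Spec_dfs_all_parents; infer_instance

-- ===== CLAIM (what is proved, stated in full; the proofs are below) =====
def Claim_equal_dfs_all_parents : Prop := ∀ (graph : List (Int × List Int)) (start : Int), Dom_dfs_all_parents graph start → Spec_dfs_all_parents graph start (dfs_all_parents graph start)

-- ===== LEMMAS AND PROOFS =====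

-- remaining adjacency mass of the not-yet-visited keys of l
def pvRemA (l : List (Int × List Int)) (v : PySem.Set Int) : Nat :=
  (l.map (fun p => if p.1 ∈ v then 0 else p.2.length)).sum

-- not-yet-visited elements of the universe list U
def pvRemU (U : List Int) (v : PySem.Set Int) : Nat :=
  (U.filter (fun x => decide (x ∉ v))).length

lemma pvRemA_cons (hd : Int × List Int) (t : List (Int × List Int)) (v : PySem.Set Int) :
    pvRemA (hd :: t) v = (if hd.1 ∈ v then 0 else hd.2.length) + pvRemA t v := by
  simp [pvRemA]

lemma pvRemU_cons (u : Int) (t : List Int) (v : PySem.Set Int) :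
    pvRemU (u :: t) v = (if u ∈ v then 0 else 1) + pvRemU t v := by
  by_cases h : u ∈ v
  · simp [pvRemU, h]
  · simp [pvRemU, h]; omega

lemma pvRemA_mono (l : List (Int × List Int)) (v v' : PySem.Set Int)
    (h : ∀ x, x ∈ v → x ∈ v') : pvRemA l v' ≤ pvRemA l v := by
  induction l with
  | nil => simp [pvRemA]
  | cons hd t ih =>
      rw [pvRemA_cons, pvRemA_cons]
      have hh : (if hd.1 ∈ v' then 0 else hd.2.length) ≤ (if hd.1 ∈ v then 0 else hd.2.length) := by
        by_cases h1 : hd.1 ∈ v'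
        · simp [h1]
        · have h2 : hd.1 ∉ v := fun hx => h1 (h _ hx)
          simp [h1, h2]
      omega

lemma pvRemU_mono (U : List Int) (v v' : PySem.Set Int)
    (h : ∀ x, x ∈ v → x ∈ v') : pvRemU U v' ≤ pvRemU U v := by
  induction U with
  | nil => simp [pvRemU]
  | cons u t ih =>
      rw [pvRemU_cons, pvRemU_cons]
      have hh : (if u ∈ v' then 0 else 1) ≤ (if u ∈ v then 0 else 1) := by
        by_cases h1 : u ∈ v'
        · simp [h1]
        · have h2 : u ∉ v := fun hx => h1 (h _ hx)
          simp [h1, h2]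
      omega

lemma pvMem_mono_add (v : PySem.Set Int) (n : Int) :
    ∀ x, x ∈ v → x ∈ PySem.Set.add v n := by
  intro x hx
  rw [PySem.Set.mem_add]
  exact Or.inl hx

lemma pvContains_true (v : PySem.Set Int) (n : Int) (h : n ∈ v) :
    PySem.Set.contains v n = true := by
  simpa [PySem.Set.contains_iff] using h

lemma pvContains_false (v : PySem.Set Int) (n : Int) (h : n ∉ v) :
    ¬ (PySem.Set.contains v n = true) := by
  simpa [PySem.Set.contains_iff] using h

lemma pvRemA_step (l : List (Int × List Int)) (v : PySem.Set Int) (n : Int) (hn : n ∉ v) :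
    pvRemA l (PySem.Set.add v n) + (((PySem.Dict.mk l).get? n).getD []).length ≤ pvRemA l v := by
  induction l with
  | nil => simp [pvRemA, PySem.Dict.get?]
  | cons hd t ih =>
      obtain ⟨k, a⟩ := hd
      rw [pvRemA_cons, pvRemA_cons]
      rw [PySem.Dict.get?_mk_cons]
      by_cases hk : k = n
      · subst hk
        have h1 : k ∈ PySem.Set.add v k := by rw [PySem.Set.mem_add]; exact Or.inr rfl
        have h2 : ¬ (k ∈ v) := hn
        have hmono := pvRemA_mono t v (PySem.Set.add v k) (pvMem_mono_add v k)
        rw [if_pos h1, if_neg h2]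
        simp only [BEq.rfl, if_pos, Option.getD_some]
        omega
      · have hbeq : (k == n) = false := by simp [hk]
        have hmem : (k ∈ PySem.Set.add v n) ↔ (k ∈ v) := by
          rw [PySem.Set.mem_add]
          constructor
          · rintro (h | h)
            · exact h
            · exact absurd h hk
          · exact Or.inl
        rw [hbeq]
        simp only [Bool.false_eq_true, if_false]
        by_cases hm : k ∈ v
        · rw [if_pos hm, if_pos (hmem.mpr hm)]
          omega
        · rw [if_neg hm, if_neg (fun hx => hm (hmem.mp hx))]
          omega

lemma pvRemU_step (U : List Int) (v : PySem.Set Int) (n : Int) (hU : n ∈ U) (hn : n ∉ v) :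
    1 + pvRemU U (PySem.Set.add v n) ≤ pvRemU U v := by
  induction U with
  | nil => simp at hU
  | cons u t ih =>
      rw [pvRemU_cons, pvRemU_cons]
      by_cases hu : u = n
      · subst hu
        have h1 : u ∈ PySem.Set.add v u := by rw [PySem.Set.mem_add]; exact Or.inr rfl
        have hmono := pvRemU_mono t v (PySem.Set.add v u) (pvMem_mono_add v u)
        rw [if_pos h1, if_neg hn]
        omega
      · rcases List.mem_cons.mp hU with h | h
        · exact absurd h.symm hu
        · have hih := ih h
          have hmem : (u ∈ PySem.Set.add v n) ↔ (u ∈ v) := by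
            rw [PySem.Set.mem_add]
            constructor
            · rintro (h' | h')
              · exact h'
              · exact absurd h' hu
            · exact Or.inl
          by_cases hm : u ∈ v
          · rw [if_pos hm, if_pos (hmem.mpr hm)]; omega
          · rw [if_neg hm, if_neg (fun hx => hm (hmem.mp hx))]; omega

-- the interleaved record-and-push fold of port A, split into its two components
lemma pvFold_prod (node : Int) (L : List Int) (p : PySem.Dict Int (List Int)) (r : List Int) :
    L.foldl (fun (s : PySem.Dict Int (List Int) × List Int) nbr =>
        (s.1.insert nbr (s.1.getD nbr [] ++ [node]), nbr :: s.2)) (p, r)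
      = (L.foldl (fun q nbr => q.insert nbr (q.getD nbr [] ++ [node])) p, L.reverse ++ r) := by
  induction L generalizing p r with
  | nil => simp
  | cons x t ih => simp [ih]

lemma dfsA_loop_nil (graph : List (Int × List Int)) (f : Nat) (v : PySem.Set Int)
    (p : PySem.Dict Int (List Int)) : dfsA_loop graph f [] v p = p := by
  cases f <;> rfl

lemma pvAdj_eq (graph : List (Int × List Int)) (n : Int) :
    pvAdj graph n = (((PySem.Dict.mk (PySem.Dict.ofList graph).items).get? n).getD []) := by
  rfl

-- fuel irrelevance of A's loop: any two sufficient fuels give the same result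
lemma dfsA_loop_irrel (graph : List (Int × List Int)) :
    ∀ (f f' : Nat) (st : List Int) (v : PySem.Set Int) (p : PySem.Dict Int (List Int)),
      st.length + pvRemA (PySem.Dict.ofList graph).items v ≤ f →
      st.length + pvRemA (PySem.Dict.ofList graph).items v ≤ f' →
      dfsA_loop graph f st v p = dfsA_loop graph f' st v p := by
  intro f
  induction f with
  | zero =>
      intro f' st v p h1 _
      have : st = [] := List.length_eq_zero_iff.mp (by omega)
      subst this
      rw [dfsA_loop_nil, dfsA_loop_nil]
  | succ f ih =>
      intro f' st v p h1 h2
      cases st with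
      | nil => rw [dfsA_loop_nil, dfsA_loop_nil]
      | cons n rest =>
          cases f' with
          | zero => simp only [List.length_cons] at h2; omega
          | succ f'' =>
              simp only [dfsA_loop]
              by_cases hc : n ∈ v
              · rw [if_pos (pvContains_true v n hc), if_pos (pvContains_true v n hc)]
                exact ih f'' rest v p (by simp at h1; omega) (by simp at h2; omega)
              · have hn : n ∉ v := hc
                rw [if_neg (pvContains_false v n hn), if_neg (pvContains_false v n hn)]
                rw [pvFold_prod]
                dsimp only
                have hstep := pvRemA_step (PySem.Dict.ofList graph).items v n hn
                rw [← pvAdj_eq] at hstep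
                apply ih
                · simp at h1 ⊢; omega
                · simp at h2 ⊢; omega

-- A's loop at its canonical sufficient fuel
def pvLA (graph : List (Int × List Int)) (st : List Int) (v : PySem.Set Int)
    (p : PySem.Dict Int (List Int)) : PySem.Dict Int (List Int) :=
  dfsA_loop graph (st.length + pvRemA (PySem.Dict.ofList graph).items v) st v p

-- B's visited set only grows
lemma dfsB_rec_mono (graph : List (Int × List Int)) (x : Int) :
    ∀ (f : Nat) (n : Int) (st : PySem.Set Int × PySem.Dict Int (List Int)),
      x ∈ st.1 → x ∈ (dfsB_rec graph f n st).1 := by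
  intro f
  induction f with
  | zero => intro n st hx; exact hx
  | succ f ih =>
      intro n st hx
      simp only [dfsB_rec]
      by_cases hc : n ∈ st.1
      · rw [if_pos (pvContains_true st.1 n hc)]
        exact hx
      · rw [if_neg (pvContains_false st.1 n hc)]
        have haux : ∀ (L : List Int) (t : PySem.Set Int × PySem.Dict Int (List Int)),
            x ∈ t.1 → x ∈ (L.foldl (fun t nbr => dfsB_rec graph f nbr t) t).1 := by
          intro L
          induction L with
          | nil => intro t ht; exact ht
          | cons y ys ihL => intro t ht; exact ihL _ (ih y t ht)
        exact haux _ _ (pvMem_mono_add st.1 n x hx)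

lemma pvAdj_sub (graph : List (Int × List Int)) (n x : Int) (hx : x ∈ pvAdj graph n) :
    x ∈ (PySem.Dict.ofList graph).items.flatMap (fun p => p.2) := by
  unfold pvAdj at hx
  rw [PySem.Dict.getD_eq_get?_getD] at hx
  cases hg : (PySem.Dict.ofList graph).get? n with
  | none => rw [hg] at hx; simp at hx
  | some a =>
      rw [hg] at hx
      simp only [Option.getD_some] at hx
      exact List.mem_flatMap.mpr ⟨(n, a), PySem.Dict.mem_items_of_get?_eq_some _ hg, hx⟩

-- the simulation: one recursive call of B advances A's loop by one stack entry
lemma pvBridge (graph : List (Int × List Int)) (U : List Int)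
    (hU : ∀ x ∈ (PySem.Dict.ofList graph).items.flatMap (fun p => p.2), x ∈ U) :
    ∀ (fB : Nat) (n : Int) (v : PySem.Set Int) (p : PySem.Dict Int (List Int)) (rest : List Int),
      n ∈ U → 1 + pvRemU U v ≤ fB →
      pvLA graph (n :: rest) v p
        = pvLA graph rest (dfsB_rec graph fB n (v, p)).1 (dfsB_rec graph fB n (v, p)).2 := by
  intro fB
  induction fB with
  | zero => intro n v p rest _ hf; omega
  | succ fB ih =>
      intro n v p rest hnU hf
      by_cases hc : n ∈ v
      · -- already visited: A pops and skips, B returns unchanged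
        simp only [dfsB_rec]
        rw [if_pos (pvContains_true v n hc)]
        unfold pvLA
        have hlen : (n :: rest).length + pvRemA (PySem.Dict.ofList graph).items v
            = (rest.length + pvRemA (PySem.Dict.ofList graph).items v) + 1 := by
          simp; omega
        rw [hlen]
        simp only [dfsA_loop]
        rw [if_pos (pvContains_true v n hc)]
      · have hn : n ∉ v := hc
        simp only [dfsB_rec]
        rw [if_neg (pvContains_false v n hn)]
        -- A: pop n, record and push the neighbors
        unfold pvLA
        have hlen : (n :: rest).length + pvRemA (PySem.Dict.ofList graph).items v
            = (rest.length + pvRemA (PySem.Dict.ofList graph).items v) + 1 := by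
          simp; omega
        rw [hlen]
        simp only [dfsA_loop]
        rw [if_neg (pvContains_false v n hn)]
        rw [pvFold_prod]
        dsimp only
        have hstep := pvRemA_step (PySem.Dict.ofList graph).items v n hn
        rw [← pvAdj_eq] at hstep
        have hUstep := pvRemU_step U v n hnU hn
        -- switch to the canonical fuel for the new state
        rw [dfsA_loop_irrel graph _
          (((pvAdj graph n).reverse ++ rest).length
            + pvRemA (PySem.Dict.ofList graph).items (PySem.Set.add v n)) _ _ _
          (by simp; omega) (by simp)]
        -- fold the recursive descent over the reversed neighbors
        have haux : ∀ (L : List Int), (∀ x ∈ L, x ∈ U) →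
            ∀ (v' : PySem.Set Int) (p' : PySem.Dict Int (List Int)) (r : List Int),
            1 + pvRemU U v' ≤ fB →
            pvLA graph (L ++ r) v' p'
              = pvLA graph r (L.foldl (fun t nbr => dfsB_rec graph fB nbr t) (v', p')).1
                  (L.foldl (fun t nbr => dfsB_rec graph fB nbr t) (v', p')).2 := by
          intro L
          induction L with
          | nil => intro _ v' p' r _; simp
          | cons x xs ihL =>
              intro hmem v' p' r hf'
              have h1 : pvLA graph (x :: (xs ++ r)) v' p'
                  = pvLA graph (xs ++ r) (dfsB_rec graph fB x (v', p')).1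
                      (dfsB_rec graph fB x (v', p')).2 :=
                ih x v' p' (xs ++ r) (hmem x (by simp)) hf'
              have hmono : ∀ y, y ∈ v' → y ∈ (dfsB_rec graph fB x (v', p')).1 :=
                fun y hy => dfsB_rec_mono graph y fB x (v', p') hy
              have hf'' : 1 + pvRemU U (dfsB_rec graph fB x (v', p')).1 ≤ fB :=
                le_trans (by have := pvRemU_mono U v' _ hmono; omega) hf'
              calc pvLA graph ((x :: xs) ++ r) v' p'
                  = pvLA graph (xs ++ r) (dfsB_rec graph fB x (v', p')).1
                      (dfsB_rec graph fB x (v', p')).2 := h1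
                _ = _ := by
                    rw [ihL (fun y hy => hmem y (by simp [hy])) _ _ r hf'']
                    simp
        exact haux (pvAdj graph n).reverse
          (fun x hx => hU x (pvAdj_sub graph n x (List.mem_reverse.mp hx)))
          (PySem.Set.add v n) _ rest (by omega)

lemma pvRemA_empty (l : List (Int × List Int)) :
    pvRemA l PySem.Set.empty = (l.flatMap (fun p => p.2)).length := by
  induction l with
  | nil => simp [pvRemA]
  | cons hd t ih =>
      rw [pvRemA_cons]
      have hne : ¬ (hd.1 ∈ PySem.Set.empty) := by simp [PySem.Set.empty]
      rw [if_neg hne, List.flatMap_cons, List.length_append, ih]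

lemma pvRemU_empty (U : List Int) : pvRemU U PySem.Set.empty = U.length := by
  simp [pvRemU, PySem.Set.empty]

-- ===== VERDICT (by name: the statement is the Claim_ definition above) =====
theorem dfs_all_parents_spec : Claim_equal_dfs_all_parents := by
  intro graph start _dom
  unfold Spec_dfs_all_parents dfs_all_parents dfs_all_parents_alt
  set U : List Int := start :: (PySem.Dict.ofList graph).items.flatMap (fun p => p.2) with hUdef
  have hU : ∀ x ∈ (PySem.Dict.ofList graph).items.flatMap (fun p => p.2), x ∈ U := by
    intro x hx; simp [hUdef, hx]
  have h1 : dfsA_loop graph (1 + pvFuelN graph) [start] PySem.Set.empty PySem.Dict.empty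
      = pvLA graph [start] PySem.Set.empty PySem.Dict.empty := by
    unfold pvLA
    congr 1
    rw [pvRemA_empty]
    simp only [pvFuelN, List.length_cons, List.length_nil]
  rw [h1]
  have hfuel : 1 + pvRemU U PySem.Set.empty ≤ 2 + pvFuelN graph := by
    rw [pvRemU_empty, hUdef, List.length_cons]
    unfold pvFuelN
    omega
  rw [pvBridge graph U hU (2 + pvFuelN graph) start PySem.Set.empty PySem.Dict.empty []
      (by simp [hUdef]) hfuel]
  unfold pvLA
  rw [dfsA_loop_nil]
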